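-- pv_equiv track=rewrite | github.com/Quantumplatr/adventOfCode | 2024/day19/solution.py | backtrack
-- ===== SOURCE A (Python) =====
-- def backtrack(pattern: str, towels, t_so_far, count):
--     # Invalid
--     if not pattern.startswith("".join(t_so_far)):
--         return None
--
--     # End case
--     if pattern == "".join(t_so_far):
--         return count
--
--     # Try all next towels
--     for t in towels:
--         c = backtrack(pattern, towels, t_so_far + [t], count + 1)
--         if c is not None:
--             return c
--
--     # Found no options
--     return None
-- ===== SOURCE B (Python) =====
-- def backtrack(pattern, towels, t_so_far, count):
--     prefix = "".join(t_so_far)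
--     if not pattern.startswith(prefix):
--         return None
--     n = len(pattern)
--     # f[pos] = towel count of the decomposition of pattern[pos:] picked by a
--     # first-match-wins scan over towels, or None if there is none.
--     f = [None] * (n + 1)
--     f[n] = 0
--     for pos in range(n - 1, -1, -1):
--         for t in towels:
--             if pattern.startswith(t, pos) and f[pos + len(t)] is not None:
--                 f[pos] = f[pos + len(t)] + 1
--                 break
--     if f[len(prefix)] is None:
--         return None
--     return count + f[len(prefix)]
-- ===== Notes on version B (the rewrite author's own statement) =====
-- stated objective: alternative
-- what changed: Replaces A's recursive DFS that re-joins and re-scans growing towel sequences by a single bottom-up DP table f[pos] over string positions (same first-match-wins towel order), read off at len(prefix).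
-- outside the precondition, e.g. on backtrack('aa', ['a', ''], [], 0): A returns 2, B returns 2
import Mathlib
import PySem

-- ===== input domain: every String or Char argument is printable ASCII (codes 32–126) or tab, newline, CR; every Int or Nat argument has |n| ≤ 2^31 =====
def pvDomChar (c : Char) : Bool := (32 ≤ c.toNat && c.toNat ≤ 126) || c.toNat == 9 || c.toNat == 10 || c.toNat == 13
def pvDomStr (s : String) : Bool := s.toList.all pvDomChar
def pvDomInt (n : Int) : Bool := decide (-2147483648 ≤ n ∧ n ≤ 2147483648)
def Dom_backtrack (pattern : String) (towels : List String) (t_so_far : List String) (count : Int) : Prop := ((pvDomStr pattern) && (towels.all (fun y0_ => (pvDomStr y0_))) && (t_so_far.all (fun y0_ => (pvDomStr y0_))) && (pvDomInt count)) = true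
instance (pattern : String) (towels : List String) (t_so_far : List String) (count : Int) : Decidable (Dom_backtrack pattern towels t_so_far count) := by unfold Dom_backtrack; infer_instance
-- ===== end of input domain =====

-- B replaces A's recursive DFS over towel sequences by a bottom-up DP table over
-- string positions (same first-match-wins towel order). A can recurse forever when
-- "" ∈ towels and the join is a proper prefix of pattern, hence Pre_ below.

-- ===== PORT A =====

/-- The `for t in towels: … if c is not None: return c` loop: first `some` wins. -/
def pvFirstSome (f : String → Option Int) : List String → Option Int
  | [] => none
  | t :: ts =>
    match f t with
    | some c => some c
    | none => pvFirstSome f ts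

/-- A's recursion, with fuel bounding the recursion depth (Python's A recurses without
    bound when "" ∈ towels — excluded by Pre_ — and inside Pre_ the fuel
    `pattern.length + 2` used below is never exhausted). -/
def backtrackAux (pattern : String) (towels : List String) : Nat → List String → Int → Option Int
  | 0, _, _ => none
  | fuel + 1, t_so_far, count =>
    -- if not pattern.startswith("".join(t_so_far)): return None
    if ¬ PySem.Str.startswith pattern (PySem.Str.join "" t_so_far) then none
    -- if pattern == "".join(t_so_far): return count
    else if pattern = PySem.Str.join "" t_so_far then some count
    -- for t in towels: …
    else pvFirstSome (fun t => backtrackAux pattern towels fuel (t_so_far ++ [t]) (count + 1)) towels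

def backtrack (pattern : String) (towels : List String) (t_so_far : List String) (count : Int) : Option Int :=
  backtrackAux pattern towels (pattern.toList.length + 2) t_so_far count

-- ===== PORT B =====

/-- Python `pattern.startswith(t, pos)`; exact for 0 ≤ pos ≤ len(pattern), the only
    positions B uses it at. -/
def pvStartswithAt (pattern t : String) (pos : Nat) : Bool :=
  t.toList.isPrefixOf (pattern.toList.drop pos)

/-- Source B's table, built back to front: `pvDP pattern towels k = [f[n-k], …, f[n]]`
    (n = len(pattern)).  The inner `for t in towels: … break` is `pvFirstSome`;
    `f[pos + len(t)]` is the table entry `len(t) - 1` of the tail, and `none` when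
    `len(t) = 0` (in Python `f[pos]` is still None while being computed). -/
def pvDP (pattern : String) (towels : List String) : Nat → List (Option Int)
  | 0 => [some 0]
  | k + 1 =>
    let tail := pvDP pattern towels k
    let pos := pattern.toList.length - (k + 1)
    let v := pvFirstSome (fun t =>
      if pvStartswithAt pattern t pos then
        (if t.toList.length = 0 then none else tail.getD (t.toList.length - 1) none).map (· + 1)
      else none) towels
    v :: tail

def backtrack_alt (pattern : String) (towels : List String) (t_so_far : List String) (count : Int) : Option Int :=
  let pre := PySem.Str.join "" t_so_far
  if ¬ PySem.Str.startswith pattern pre then none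
  else
    let table := pvDP pattern towels pattern.toList.length
    match table.getD pre.toList.length none with
    | none => none
    | some v => some (count + v)

-- ===== PRECONDITION & SPEC =====
-- Pre_ excludes the inputs on which A's recursion can reach the empty towel ("" among
-- the towels while the joined prefix is a proper prefix of pattern): there Python's A
-- can recurse without bound (RecursionError).
def Pre_backtrack (pattern : String) (towels : List String) (t_so_far : List String) (count : Int) : Prop :=
  "" ∉ towels ∨ ¬ PySem.Str.startswith pattern (PySem.Str.join "" t_so_far) = true
    ∨ pattern = PySem.Str.join "" t_so_far
instance (pattern : String) (towels : List String) (t_so_far : List String) (count : Int) : Decidable (Pre_backtrack pattern towels t_so_far count) := by unfold Pre_backtrack; infer_instance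

def pvWitness_backtrack : String × List String × List String × Int := ("abab", ["a", "b"], ["a"], 1)

def Spec_backtrack (pattern : String) (towels : List String) (t_so_far : List String) (count : Int) (out : Option Int) : Prop := out = backtrack_alt pattern towels t_so_far count
instance (pattern : String) (towels : List String) (t_so_far : List String) (count : Int) (out : Option Int) : Decidable (Spec_backtrack pattern towels t_so_far count out) := by unfold Spec_backtrack; infer_instance

-- ===== CLAIM (what is proved, stated in full; the proofs are below) =====
def Claim_equal_backtrack : Prop := ∀ (pattern : String) (towels : List String) (t_so_far : List String) (count : Int), Dom_backtrack pattern towels t_so_far count → Pre_backtrack pattern towels t_so_far count → Spec_backtrack pattern towels t_so_far count (backtrack pattern towels t_so_far count)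

-- ===== LEMMAS AND PROOFS =====


theorem pvFlatten_intersperse_nil (l : List (List Char)) :
    (List.intersperse ([] : List Char) l).flatten = l.flatten := by
  induction l with
  | nil => simp
  | cons x xs ih =>
    cases xs with
    | nil => simp
    | cons y ys =>
      rw [show List.intersperse ([]:List Char) (x::y::ys) = x :: [] :: List.intersperse [] (y::ys) from rfl]
      simp [ih]

theorem pvJoinNil_toList (ts : List String) :
    (PySem.Str.join "" ts).toList = (ts.map String.toList).flatten := by
  rw [PySem.Str.toList_join]
  show PySem.Chars.join [] _ = _
  simp [PySem.Chars.join, List.intercalate, pvFlatten_intersperse_nil]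

theorem pvJoin_append_single (ts : List String) (t : String) :
    (PySem.Str.join "" (ts ++ [t])).toList = (PySem.Str.join "" ts).toList ++ t.toList := by
  rw [pvJoinNil_toList, pvJoinNil_toList]; simp

theorem pvDP_getD (pattern : String) (towels : List String) (k i : Nat) (h : i ≤ k) :
    (pvDP pattern towels k).getD i none = (pvDP pattern towels (k - i)).headD none := by
  induction k generalizing i with
  | zero =>
    have : i = 0 := by omega
    subst this; rfl
  | succ k ih =>
    cases i with
    | zero =>
      rw [pvDP]
      rfl
    | succ i =>
      rw [pvDP]
      show (pvDP pattern towels k).getD i none = _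
      rw [ih i (by omega)]
      rw [Nat.succ_sub_succ]

theorem pvFirstSome_congr_map (m : Int → Int) (f g : String → Option Int) (ts : List String)
    (h : ∀ t ∈ ts, f t = Option.map m (g t)) :
    pvFirstSome f ts = Option.map m (pvFirstSome g ts) := by
  induction ts with
  | nil => rfl
  | cons t ts ih =>
    rw [pvFirstSome, pvFirstSome, h t (by simp)]
    cases g t with
    | none => exact ih (fun t ht => h t (by simp [ht]))
    | some c => rfl

theorem pvMainLemma (pattern : String) (towels : List String) (hP : "" ∉ towels) :
    ∀ (fuel : Nat) (t_so_far : List String) (count : Int),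
      (PySem.Str.join "" t_so_far).toList <+: pattern.toList →
      pattern.toList.length - (PySem.Str.join "" t_so_far).toList.length < fuel →
      backtrackAux pattern towels fuel t_so_far count =
        Option.map (fun v => count + v)
          ((pvDP pattern towels (pattern.toList.length - (PySem.Str.join "" t_so_far).toList.length)).headD none) := by
  intro fuel
  induction fuel with
  | zero => intro tsf count hpre hfuel; omega
  | succ fuel ih =>
    intro tsf count hpre hfuel
    have hstart : PySem.Str.startswith pattern (PySem.Str.join "" tsf) = true := by
      rw [PySem.Str.startswith_eq]; exact (PySem.Chars.startswith_iff _ _).mpr hpre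
    have hJlen : (PySem.Str.join "" tsf).toList.length ≤ pattern.toList.length := hpre.length_le
    by_cases heq : (PySem.Str.join "" tsf).toList.length = pattern.toList.length
    · -- the join equals the whole pattern: A returns count, the table entry is f[n] = 0
      have hJP : (PySem.Str.join "" tsf).toList = pattern.toList := hpre.eq_of_length heq
      have hpat : pattern = PySem.Str.join "" tsf := by
        apply String.ext
        exact hJP.symm
      rw [backtrackAux]
      rw [if_neg (not_not_intro hstart), if_pos hpat]
      rw [show pattern.toList.length - (PySem.Str.join "" tsf).toList.length = 0 from by omega]
      simp [pvDP]
    · have hlt : (PySem.Str.join "" tsf).toList.length < pattern.toList.length := by omega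
      have hne : ¬ (pattern = PySem.Str.join "" tsf) := by
        intro h; apply heq; rw [h]
      rw [backtrackAux]
      simp only [hstart, not_false_eq_true, if_neg, hne]
      obtain ⟨d, hd⟩ : ∃ d, pattern.toList.length - (PySem.Str.join "" tsf).toList.length = d + 1 :=
        ⟨pattern.toList.length - (PySem.Str.join "" tsf).toList.length - 1, by omega⟩
      rw [hd, pvDP]
      show pvFirstSome _ towels = Option.map _ (pvFirstSome _ towels)
      apply pvFirstSome_congr_map
      intro t ht
      have htne : t.toList ≠ [] := by
        intro hnil
        have ht0 : t = "" := String.ext (by simpa using hnil)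
        exact hP (ht0 ▸ ht)
      have htlen : 1 ≤ t.toList.length := by
        cases h' : t.toList with
        | nil => exact absurd h' htne
        | cons a l => simp
      have hpos : pattern.toList.length - (d + 1) = (PySem.Str.join "" tsf).toList.length := by omega
      have hJ' : (PySem.Str.join "" (tsf ++ [t])).toList
          = (PySem.Str.join "" tsf).toList ++ t.toList := pvJoin_append_single tsf t
      obtain ⟨r, hr⟩ := hpre
      have hdrop : pattern.toList.drop (PySem.Str.join "" tsf).toList.length = r := by
        rw [← hr]; simp
      by_cases hm : t.toList.isPrefixOf (pattern.toList.drop (pattern.toList.length - (d + 1))) = true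
      · -- towel matches at this position
        rw [hpos, hdrop] at hm
        have hmt : t.toList <+: r := List.isPrefixOf_iff_prefix.mp hm
        obtain ⟨s, hs⟩ := hmt
        have hpre' : (PySem.Str.join "" (tsf ++ [t])).toList <+: pattern.toList := by
          rw [hJ']
          exact ⟨s, by rw [List.append_assoc, hs, hr]⟩
        have hlen' : (PySem.Str.join "" (tsf ++ [t])).toList.length
            = (PySem.Str.join "" tsf).toList.length + t.toList.length := by
          rw [hJ']; simp
        have hle' : (PySem.Str.join "" tsf).toList.length + t.toList.length ≤ pattern.toList.length := by
          have := hpre'.length_le; omega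
        rw [ih (tsf ++ [t]) (count + 1) hpre' (by omega)]
        rw [hlen']
        simp only [pvStartswithAt, hpos, hdrop, hm, if_pos]
        rw [if_neg (by omega)]
        rw [pvDP_getD pattern towels d (t.toList.length - 1) (by omega)]
        rw [show d - (t.toList.length - 1)
            = pattern.toList.length - ((PySem.Str.join "" tsf).toList.length + t.toList.length) from by omega]
        cases (pvDP pattern towels
            (pattern.toList.length - ((PySem.Str.join "" tsf).toList.length + t.toList.length))).headD none with
        | none => rfl
        | some v => simp; ring
      · -- towel does not match: A's recursive call fails the prefix check immediately
        have hnpre : ¬ ((PySem.Str.join "" (tsf ++ [t])).toList <+: pattern.toList) := by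
          intro hc
          apply hm
          rw [hpos, hdrop]
          apply List.isPrefixOf_iff_prefix.mpr
          obtain ⟨s, hs⟩ := hc
          rw [hJ'] at hs
          refine ⟨s, ?_⟩
          have : (PySem.Str.join "" tsf).toList ++ (t.toList ++ s)
              = (PySem.Str.join "" tsf).toList ++ r := by
            rw [← List.append_assoc, hs, hr]
          exact (List.append_cancel_left this)
        have hstart' : PySem.Str.startswith pattern (PySem.Str.join "" (tsf ++ [t])) = false := by
          rw [PySem.Str.startswith_eq]
          rw [Bool.eq_false_iff]
          intro hc
          exact hnpre ((PySem.Chars.startswith_iff _ _).mp hc)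
        obtain ⟨f', rfl⟩ : ∃ f', fuel = f' + 1 := ⟨fuel - 1, by omega⟩
        rw [backtrackAux]
        simp only [hstart', reduceIte]
        simp only [pvStartswithAt, if_neg, hm, Bool.false_eq_true, not_false_eq_true, reduceIte]
        rfl

theorem backtrack_spec_aux (pattern : String) (towels : List String) (tsf : List String)
    (count : Int) (hP : "" ∉ towels)
    (hs : PySem.Str.startswith pattern (PySem.Str.join "" tsf) = true) :
    backtrack pattern towels tsf count = backtrack_alt pattern towels tsf count := by
  unfold backtrack backtrack_alt
  have hprefix : (PySem.Str.join "" tsf).toList <+: pattern.toList := by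
    rw [PySem.Str.startswith_eq] at hs
    exact (PySem.Chars.startswith_iff _ _).mp hs
  have hlen : (PySem.Str.join "" tsf).toList.length ≤ pattern.toList.length := hprefix.length_le
  rw [pvMainLemma pattern towels hP (pattern.toList.length + 2) tsf count hprefix (by omega)]
  simp only [hs, Bool.not_true, Bool.false_eq_true]
  rw [pvDP_getD pattern towels pattern.toList.length (PySem.Str.join "" tsf).toList.length hlen]
  cases (pvDP pattern towels
      (pattern.toList.length - (PySem.Str.join "" tsf).toList.length)).headD none with
  | none => rfl
  | some v => rfl

-- ===== VERDICT (by name: the statement is the Claim_ definition above) =====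
theorem backtrack_spec : Claim_equal_backtrack := by
  intro pattern towels tsf count _ hpre
  unfold Spec_backtrack
  by_cases hs : PySem.Str.startswith pattern (PySem.Str.join "" tsf) = true
  · rcases hpre with hP | hns | heq
    · exact backtrack_spec_aux pattern towels tsf count hP hs
    · exact absurd hs hns
    · -- the join already equals the whole pattern: both sides return count
      have hJP : (PySem.Str.join "" tsf).toList = pattern.toList := by rw [heq]
      have hJlen : (PySem.Str.join "" tsf).toList.length = pattern.toList.length := by rw [hJP]
      unfold backtrack backtrack_alt
      rw [show pattern.toList.length + 2 = (pattern.toList.length + 1) + 1 from rfl, backtrackAux,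
        if_neg (not_not_intro hs), if_pos heq]
      simp only [hs, Bool.not_true, Bool.false_eq_true]
      rw [pvDP_getD pattern towels pattern.toList.length (PySem.Str.join "" tsf).toList.length
        (by omega)]
      rw [show pattern.toList.length - (PySem.Str.join "" tsf).toList.length = 0 from by omega]
      simp [pvDP]
  · have hs' : PySem.Str.startswith pattern (PySem.Str.join "" tsf) = false :=
      Bool.eq_false_iff.mpr hs
    have hs'' := hs'
    rw [PySem.Str.startswith_eq] at hs''
    simp only [PySem.Str.toList_join] at hs''
    rw [show ("" : String).toList = ([] : List Char) from rfl] at hs''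
    unfold backtrack backtrack_alt
    rw [show pattern.toList.length + 2 = (pattern.toList.length + 1) + 1 from rfl, backtrackAux]
    simp [hs'']
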